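-- pv_equiv track=rewrite | github.com/treehousetherapy/eidbi-query-system | knowledge_base_audit_system.py | _identify_missing_subtopics
-- ===== SOURCE A (Python) =====
-- from typing import Dict, List, Any, Optional, Tuple
--
-- def _identify_missing_subtopics(chunks: List[Dict], subtopics: List[str]) -> List[str]:
--     """Identify which subtopics are missing from current content"""
--     covered_subtopics = set()
--
--     for chunk in chunks:
--         content = chunk.get('content_preview', '').lower()
--         for subtopic in subtopics:
--             subtopic_words = subtopic.lower().split()
--             if any(word in content for word in subtopic_words):
--                 covered_subtopics.add(subtopic)
--
--     return [subtopic for subtopic in subtopics if subtopic not in covered_subtopics]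
-- ===== SOURCE B (Python) =====
-- def _identify_missing_subtopics(chunks, subtopics):
--     """Identify which subtopics are missing from current content"""
--     # One combined haystack: words from .split() contain no whitespace, so a word
--     # occurs in the '\n'-joined haystack iff it occurs in some chunk's content.
--     haystack = "\n".join(chunk.get('content_preview', '').lower() for chunk in chunks)
--     missing = []
--     for subtopic in subtopics:
--         if not any(word in haystack for word in subtopic.lower().split()):
--             missing.append(subtopic)
--     return missing
-- ===== Notes on version B (the rewrite author's own statement) =====
-- stated objective: faster
-- what changed: B joins all lowered chunk contents into one '\n'-separated haystack (correct because split() words contain no whitespace, so no match can cross a separator) and decides missingness per subtopic with one substring test per word against that single string, eliminating the per-chunk x per-subtopic nesting, the repeated lowering/splitting of every subtopic once per chunk, and the covered-set accumulator.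
import Mathlib
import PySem

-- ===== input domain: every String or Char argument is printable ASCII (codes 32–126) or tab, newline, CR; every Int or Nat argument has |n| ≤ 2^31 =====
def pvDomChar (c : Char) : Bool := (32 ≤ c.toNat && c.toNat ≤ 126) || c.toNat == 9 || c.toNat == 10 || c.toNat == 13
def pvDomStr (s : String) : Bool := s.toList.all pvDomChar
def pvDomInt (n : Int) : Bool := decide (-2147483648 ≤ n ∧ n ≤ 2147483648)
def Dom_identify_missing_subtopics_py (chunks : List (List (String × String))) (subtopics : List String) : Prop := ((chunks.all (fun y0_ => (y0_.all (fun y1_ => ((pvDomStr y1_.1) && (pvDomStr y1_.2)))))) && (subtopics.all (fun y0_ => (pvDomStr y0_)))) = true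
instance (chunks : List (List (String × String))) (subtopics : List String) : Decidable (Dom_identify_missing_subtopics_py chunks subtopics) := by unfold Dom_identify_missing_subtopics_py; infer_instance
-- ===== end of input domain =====

-- B joins all lowered contents into one '\n'-separated haystack (split() words contain no
-- whitespace, so no match crosses a separator) and tests each subtopic's words against that
-- single string — no per-chunk loop, no repeated subtopic lowering, no covered-set accumulator (objective: faster, measured).

-- ===== PORT A =====
-- content = chunk.get('content_preview', '').lower()
def pvContentOf (chunk : List (String × String)) : String :=
  PySem.Str.lower ((PySem.Dict.mk chunk).getD "content_preview" "")

def identify_missing_subtopics_py (chunks : List (List (String × String))) (subtopics : List String) : List String :=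
  let covered := chunks.foldl (fun (covered : PySem.Set String) chunk =>
    let content := pvContentOf chunk
    subtopics.foldl (fun covered subtopic =>
      if (PySem.Str.split₀ (PySem.Str.lower subtopic)).any (fun word => PySem.Str.isIn word content)
      then covered.add subtopic
      else covered) covered) PySem.Set.empty
  subtopics.filter (fun subtopic => !(covered.contains subtopic))

-- ===== PORT B =====
def identify_missing_subtopics_py_alt (chunks : List (List (String × String))) (subtopics : List String) : List String :=
  let haystack := PySem.Str.join "\n"
    (chunks.map (fun chunk => PySem.Str.lower ((PySem.Dict.mk chunk).getD "content_preview" "")))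
  subtopics.foldl (fun missing subtopic =>
    if !((PySem.Str.split₀ (PySem.Str.lower subtopic)).any (fun word => PySem.Str.isIn word haystack))
    then missing ++ [subtopic]
    else missing) []

-- ===== PRECONDITION & SPEC =====
def Spec_identify_missing_subtopics_py (chunks : List (List (String × String))) (subtopics : List String) (out : List String) : Prop := out = identify_missing_subtopics_py_alt chunks subtopics
instance (chunks : List (List (String × String))) (subtopics : List String) (out : List String) : Decidable (Spec_identify_missing_subtopics_py chunks subtopics out) := by unfold Spec_identify_missing_subtopics_py; infer_instance

-- ===== CLAIM (what is proved, stated in full; the proofs are below) =====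
def Claim_equal_identify_missing_subtopics_py : Prop := ∀ (chunks : List (List (String × String))) (subtopics : List String), Dom_identify_missing_subtopics_py chunks subtopics → Spec_identify_missing_subtopics_py chunks subtopics (identify_missing_subtopics_py chunks subtopics)

-- ===== LEMMAS AND PROOFS =====

-- "subtopic hits content": some word of subtopic.lower().split() is a substring of content
def pvHit (content subtopic : String) : Bool :=
  (PySem.Str.split₀ (PySem.Str.lower subtopic)).any (fun word => PySem.Str.isIn word content)

-- membership after A's inner loop over subtopics (one chunk)
lemma pv_inner_mem (content : String) (subtopics : List String) (cov : PySem.Set String) (x : String) :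
    x ∈ subtopics.foldl (fun cov subtopic => if pvHit content subtopic then cov.add subtopic else cov) cov
      ↔ x ∈ cov ∨ (x ∈ subtopics ∧ pvHit content x = true) := by
  induction subtopics generalizing cov with
  | nil => simp
  | cons t ts ih =>
    simp only [List.foldl_cons, ih]
    by_cases h : pvHit content t = true
    · simp only [h, if_pos]
      rw [PySem.Set.mem_add]
      constructor
      · rintro (⟨hc | rfl⟩ | ⟨hm, hh⟩)
        · exact Or.inl hc
        · exact Or.inr ⟨List.mem_cons_self, h⟩
        · exact Or.inr ⟨List.mem_cons_of_mem _ hm, hh⟩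
      · rintro (hc | ⟨hm, hh⟩)
        · exact Or.inl (Or.inl hc)
        · rcases List.mem_cons.mp hm with rfl | hm'
          · exact Or.inl (Or.inr rfl)
          · exact Or.inr ⟨hm', hh⟩
    · simp only [h, if_neg, Bool.false_eq_true, not_false_iff]
      constructor
      · rintro (hc | ⟨hm, hh⟩)
        · exact Or.inl hc
        · exact Or.inr ⟨List.mem_cons_of_mem _ hm, hh⟩
      · rintro (hc | ⟨hm, hh⟩)
        · exact Or.inl hc
        · rcases List.mem_cons.mp hm with rfl | hm'
          · exact absurd hh h
          · exact Or.inr ⟨hm', hh⟩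

-- membership after A's outer loop over chunks
lemma pv_outer_mem (chunks : List (List (String × String))) (subtopics : List String)
    (cov : PySem.Set String) (x : String) :
    x ∈ chunks.foldl (fun cov chunk =>
          subtopics.foldl (fun cov subtopic => if pvHit (pvContentOf chunk) subtopic then cov.add subtopic else cov) cov) cov
      ↔ x ∈ cov ∨ (x ∈ subtopics ∧ chunks.any (fun chunk => pvHit (pvContentOf chunk) x) = true) := by
  induction chunks generalizing cov with
  | nil => simp
  | cons c cs ih =>
    simp only [List.foldl_cons, ih, pv_inner_mem, List.any_cons, Bool.or_eq_true]
    constructor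
    · rintro ((h | ⟨hm, hh⟩) | ⟨hm, hh⟩)
      · exact Or.inl h
      · exact Or.inr ⟨hm, Or.inl hh⟩
      · exact Or.inr ⟨hm, Or.inr hh⟩
    · rintro (h | ⟨hm, hh | hh⟩)
      · exact Or.inl (Or.inl h)
      · exact Or.inl (Or.inr ⟨hm, hh⟩)
      · exact Or.inr ⟨hm, hh⟩

-- every word produced by split() is nonempty and whitespace-free (invariant of split₀.go)
lemma pv_go_ok (s : List Char) (cur : List Char) (acc : List (List Char))
    (hcur : ∀ c ∈ cur, PySem.Chars.isspace c = false)
    (hacc : ∀ l ∈ acc, l ≠ [] ∧ ∀ c ∈ l, PySem.Chars.isspace c = false) :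
    ∀ w ∈ PySem.Chars.split₀.go s cur acc, w ≠ [] ∧ ∀ c ∈ w, PySem.Chars.isspace c = false := by
  induction s generalizing cur acc with
  | nil =>
    rw [PySem.Chars.split₀.go]
    by_cases h : cur.isEmpty
    · simpa [h] using fun w hw => hacc w hw
    · simp only [h, Bool.false_eq_true, if_neg, not_false_iff]
      intro w hw
      rw [List.mem_reverse, List.mem_cons] at hw
      rcases hw with rfl | hw'
      · exact ⟨by simpa [List.isEmpty_iff] using h, fun c hc => hcur c (List.mem_reverse.mp hc)⟩
      · exact hacc w hw'
  | cons c rest ih =>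
    rw [PySem.Chars.split₀.go]
    by_cases hsp : PySem.Chars.isspace c
    · by_cases hemp : cur.isEmpty
      · simp only [hsp, hemp, if_pos]
        exact ih [] acc (by simp) hacc
      · simp only [hsp, hemp, if_pos, Bool.false_eq_true, if_neg, not_false_iff]
        refine ih [] (cur.reverse :: acc) (by simp) ?_
        intro l hl
        rcases List.mem_cons.mp hl with rfl | hl'
        · exact ⟨by simpa [List.isEmpty_iff] using hemp,
            fun d hd => hcur d (List.mem_reverse.mp hd)⟩
        · exact hacc l hl'
    · simp only [hsp, Bool.false_eq_true, if_neg, not_false_iff]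
      refine ih (c :: cur) acc ?_ hacc
      intro d hd
      rcases List.mem_cons.mp hd with rfl | hd'
      · exact Bool.eq_false_iff.mpr hsp
      · exact hcur d hd'

lemma pv_words_ok (s : List Char) :
    ∀ w ∈ PySem.Chars.split₀ s, w ≠ [] ∧ ∀ c ∈ w, PySem.Chars.isspace c = false := by
  rw [PySem.Chars.split₀]
  exact pv_go_ok s [] [] (by simp) (by simp)

-- a whitespace-free word is a prefix of a ++ sep :: r only within a
lemma pv_prefix_sep (w : List Char) (sep : Char) (hsep : sep ∉ w) :
    ∀ (a r : List Char), w <+: a ++ sep :: r → w <+: a := by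
  induction w with
  | nil => exact fun a r _ => List.nil_prefix
  | cons c w' ih =>
    intro a r hpre
    cases a with
    | nil =>
      rcases (List.cons_prefix_cons.mp hpre) with ⟨rfl, _⟩
      exact absurd List.mem_cons_self hsep
    | cons b a' =>
      rcases List.cons_prefix_cons.mp hpre with ⟨rfl, h'⟩
      exact List.cons_prefix_cons.mpr ⟨rfl, ih (fun hm => hsep (List.mem_cons_of_mem _ hm)) a' r h'⟩

-- a whitespace-free word is an infix of a ++ sep :: r iff it is an infix of a part
lemma pv_infix_sep (w : List Char) (sep : Char) (hsep : sep ∉ w) (a r : List Char) :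
    w <:+: a ++ sep :: r ↔ w <:+: a ∨ w <:+: r := by
  constructor
  · intro h
    induction a with
    | nil =>
      rcases List.infix_cons_iff.mp h with h' | h'
      · have := pv_prefix_sep w sep hsep [] r h'
        exact Or.inl (List.prefix_nil.mp this ▸ List.nil_infix)
      · exact Or.inr h'
    | cons x a' ih =>
      rcases List.infix_cons_iff.mp h with h' | h'
      · exact Or.inl (pv_prefix_sep w sep hsep (x :: a') r h').isInfix
      · rcases ih h' with h'' | h''
        · exact Or.inl (h''.trans (List.suffix_cons x a').isInfix)
        · exact Or.inr h''
  · rintro (h | h)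
    · exact h.trans (List.prefix_append a (sep :: r)).isInfix
    · exact h.trans ((List.suffix_cons sep r).trans (List.suffix_append a (sep :: r))).isInfix

-- a nonempty '\n'-free word is in the '\n'-joined list iff it is in some part
lemma pv_isIn_join (w : List Char) (parts : List (List Char))
    (hne : w ≠ []) (hsep : '\n' ∉ w) :
    PySem.Chars.isIn w (PySem.Chars.join ['\n'] parts)
      = parts.any (fun p => PySem.Chars.isIn w p) := by
  rw [Bool.eq_iff_iff, PySem.Chars.isIn_iff_infix, List.any_eq_true]
  show w <:+: List.intercalate ['\n'] parts ↔ _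
  induction parts with
  | nil =>
    have h1 : List.intercalate ['\n'] ([] : List (List Char)) = [] := by simp [List.intercalate]
    rw [h1]
    constructor
    · intro h; exact absurd (List.eq_nil_of_infix_nil h) hne
    · rintro ⟨p, hp, _⟩; simp at hp
  | cons p rest ih =>
    cases rest with
    | nil =>
      have h1 : List.intercalate ['\n'] [p] = p := by simp [List.intercalate]
      rw [h1]
      constructor
      · intro h; exact ⟨p, List.mem_singleton_self p, (PySem.Chars.isIn_iff_infix w p).mpr h⟩
      · rintro ⟨q, hq, hin⟩
        rcases List.mem_singleton.mp hq with rfl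
        exact (PySem.Chars.isIn_iff_infix w q).mp hin
    | cons q rest' =>
      have hstep : List.intercalate ['\n'] (p :: q :: rest')
          = p ++ '\n' :: List.intercalate ['\n'] (q :: rest') := by
        simp [List.intercalate]
      rw [hstep, pv_infix_sep w '\n' hsep p _, ih]
      constructor
      · rintro (h | ⟨x, hx, hin⟩)
        · exact ⟨p, List.mem_cons_self, (PySem.Chars.isIn_iff_infix w p).mpr h⟩
        · exact ⟨x, List.mem_cons_of_mem _ hx, hin⟩
      · rintro ⟨x, hx, hin⟩
        rcases List.mem_cons.mp hx with rfl | hx'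
        · exact Or.inl ((PySem.Chars.isIn_iff_infix w x).mp hin)
        · exact Or.inr ⟨x, hx', hin⟩

-- B's per-subtopic test against the joined haystack = A's "some chunk hits"
lemma pv_alt_test (chunks : List (List (String × String))) (subtopic : String) :
    ((PySem.Str.split₀ (PySem.Str.lower subtopic)).any (fun word =>
        PySem.Str.isIn word (PySem.Str.join "\n" (chunks.map (fun chunk =>
          PySem.Str.lower ((PySem.Dict.mk chunk).getD "content_preview" ""))))))
      = chunks.any (fun chunk => pvHit (pvContentOf chunk) subtopic) := by
  rw [Bool.eq_iff_iff, List.any_eq_true, List.any_eq_true]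
  constructor
  · rintro ⟨word, hw, hin⟩
    have hwc : word.toList ∈ PySem.Chars.split₀ (PySem.Str.lower subtopic).toList := by
      rw [← PySem.Str.split₀_map_toList]
      exact List.mem_map_of_mem hw
    obtain ⟨hne, hws⟩ := pv_words_ok _ _ hwc
    have hsep : '\n' ∉ word.toList := fun hm => by
      have := hws '\n' hm
      simp [PySem.Chars.isspace] at this
    rw [PySem.Str.isIn_eq, PySem.Str.toList_join] at hin
    rw [show ("\n" : String).toList = ['\n'] from rfl] at hin
    rw [pv_isIn_join word.toList _ hne hsep, List.any_eq_true] at hin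
    obtain ⟨p, hp, hpin⟩ := hin
    rw [List.map_map, List.mem_map] at hp
    obtain ⟨chunk, hc, rfl⟩ := hp
    refine ⟨chunk, hc, ?_⟩
    rw [pvHit, List.any_eq_true]
    refine ⟨word, hw, ?_⟩
    rw [PySem.Str.isIn_eq]
    exact hpin
  · rintro ⟨chunk, hc, hhit⟩
    rw [pvHit, List.any_eq_true] at hhit
    obtain ⟨word, hw, hin⟩ := hhit
    refine ⟨word, hw, ?_⟩
    have hwc : word.toList ∈ PySem.Chars.split₀ (PySem.Str.lower subtopic).toList := by
      rw [← PySem.Str.split₀_map_toList]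
      exact List.mem_map_of_mem hw
    obtain ⟨hne, hws⟩ := pv_words_ok _ _ hwc
    have hsep : '\n' ∉ word.toList := fun hm => by
      have := hws '\n' hm
      simp [PySem.Chars.isspace] at this
    rw [PySem.Str.isIn_eq, PySem.Str.toList_join]
    rw [show ("\n" : String).toList = ['\n'] from rfl]
    rw [pv_isIn_join word.toList _ hne hsep, List.any_eq_true]
    refine ⟨(pvContentOf chunk).toList, ?_, by rw [PySem.Str.isIn_eq] at hin; exact hin⟩
    rw [List.map_map]
    exact List.mem_map_of_mem hc

-- ===== VERDICT (by name: the statement is the Claim_ definition above) =====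
theorem identify_missing_subtopics_py_spec : Claim_equal_identify_missing_subtopics_py := by
  unfold Claim_equal_identify_missing_subtopics_py
  intro chunks subtopics _
  unfold Spec_identify_missing_subtopics_py identify_missing_subtopics_py identify_missing_subtopics_py_alt
  simp only [pv_alt_test]
  rw [PySem.List.foldl_append_if
        (p := fun subtopic => !(chunks.any (fun chunk => pvHit (pvContentOf chunk) subtopic)))
        (f := fun s => s) subtopics []]
  simp only [List.nil_append, List.map_id']
  apply List.filter_congr
  intro x hx
  have hmem := pv_outer_mem chunks subtopics PySem.Set.empty x
  have hempty : x ∉ (PySem.Set.empty : PySem.Set String) := by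
    simp [PySem.Set.empty]
  have hc : PySem.Set.contains
      (chunks.foldl (fun cov chunk =>
        subtopics.foldl (fun cov subtopic =>
          if pvHit (pvContentOf chunk) subtopic then cov.add subtopic else cov) cov) PySem.Set.empty) x
      = chunks.any (fun chunk => pvHit (pvContentOf chunk) x) := by
    rw [Bool.eq_iff_iff]
    simp only [PySem.Set.contains, List.contains_iff_mem, hmem, List.any_eq_true]
    constructor
    · rintro (h0 | ⟨_, hh⟩)
      · exact absurd h0 hempty
      · exact hh
    · intro h
      exact Or.inr ⟨hx, h⟩
  simp only [pvHit] at hc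
  exact congrArg (fun b : Bool => !b) hc
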